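-- pv_equiv track=rewrite | github.com/gnjardim/prog1_puc-rio | Old/Exercicios P1 - Condicionais e Recursão/lista recursao seibel.py | posicaoMenor
-- ===== SOURCE A (Python) =====
-- def posicaoMenor(n1,n2):
--     if n1<10:
--         if n1<n2:
--             return True
--         return False
--     if n1%10<n2%10: #se isso for verdade, verifique o resto. Se nao NAO PRECISA VERIFICAR O RESTO POIS JA SE TORNA FALSO
--         return posicaoMenor(n1//10,n2//10)
--     return False
-- ===== SOURCE B (Python) =====
-- def posicaoMenor(n1, n2):
--     # Two-phase decomposition: first collect the digit pairs iteratively,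
--     # then check them all at once (plus the asymmetric final comparison).
--     if n1 < 10:
--         return n1 < n2
--     d1, d2 = [], []
--     a, b = n1, n2
--     while a >= 10:
--         d1.append(a % 10)
--         d2.append(b % 10)
--         a //= 10
--         b //= 10
--     return all(x < y for x, y in zip(d1, d2)) and a < b
-- ===== Notes on version B (the rewrite author's own statement) =====
-- stated objective: alternative
-- what changed: Replaces the short-circuiting recursion with an iterative two-phase version: a loop first collects the digit pairs into two lists, then a single all() over the zipped lists plus the final comparison decides the result.
import Mathlib
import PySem

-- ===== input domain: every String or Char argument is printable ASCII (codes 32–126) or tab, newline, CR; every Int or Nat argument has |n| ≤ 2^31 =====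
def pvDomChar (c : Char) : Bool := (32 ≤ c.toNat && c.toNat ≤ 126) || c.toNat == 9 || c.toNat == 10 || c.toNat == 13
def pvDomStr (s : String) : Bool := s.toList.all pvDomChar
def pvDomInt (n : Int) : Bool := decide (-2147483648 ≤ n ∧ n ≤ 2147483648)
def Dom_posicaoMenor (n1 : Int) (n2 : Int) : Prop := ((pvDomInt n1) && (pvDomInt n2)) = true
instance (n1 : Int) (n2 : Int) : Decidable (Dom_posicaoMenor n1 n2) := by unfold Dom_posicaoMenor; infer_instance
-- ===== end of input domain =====

-- B replaces A's short-circuiting recursion by a two-phase version (collect digit pairs, then check all of them); same cost, different decomposition.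


-- ===== PORT A =====
def posicaoMenor (n1 : Int) (n2 : Int) : Bool :=
  if n1 < 10 then
    if n1 < n2 then true else false
  else if PySem.Int.mod n1 10 < PySem.Int.mod n2 10 then
    posicaoMenor (PySem.Int.floordiv n1 10) (PySem.Int.floordiv n2 10)
  else false
termination_by n1.toNat
decreasing_by
  simp only [PySem.Int.floordiv_eq_ediv_of_pos (by norm_num : (0:Int) < 10)]
  omega

-- ===== PORT B =====
-- the while loop of Source B: collects (a % 10, b % 10) pairs while a >= 10, returns (d1, d2, final a, final b)
def pmDigits (a : Int) (b : Int) : List Int × List Int × Int × Int :=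
  if 10 ≤ a then
    let r := pmDigits (PySem.Int.floordiv a 10) (PySem.Int.floordiv b 10)
    (PySem.Int.mod a 10 :: r.1, PySem.Int.mod b 10 :: r.2.1, r.2.2)
  else ([], [], a, b)
termination_by a.toNat
decreasing_by
  simp only [PySem.Int.floordiv_eq_ediv_of_pos (by norm_num : (0:Int) < 10)]
  omega

def posicaoMenor_alt (n1 : Int) (n2 : Int) : Bool :=
  if n1 < 10 then decide (n1 < n2)
  else
    let r := pmDigits n1 n2
    ((r.1.zip r.2.1).all fun p => decide (p.1 < p.2)) && decide (r.2.2.1 < r.2.2.2)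

-- ===== PRECONDITION & SPEC =====
def Spec_posicaoMenor (n1 : Int) (n2 : Int) (out : Bool) : Prop := out = posicaoMenor_alt n1 n2
instance (n1 : Int) (n2 : Int) (out : Bool) : Decidable (Spec_posicaoMenor n1 n2 out) := by unfold Spec_posicaoMenor; infer_instance

-- ===== CLAIM (what is proved, stated in full; the proofs are below) =====
def Claim_equal_posicaoMenor : Prop := ∀ (n1 : Int) (n2 : Int), Dom_posicaoMenor n1 n2 → Spec_posicaoMenor n1 n2 (posicaoMenor n1 n2)

-- ===== LEMMAS AND PROOFS =====
-- A's recursion computes exactly B's second phase applied to the collected digit pairs.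
theorem posicaoMenor_eq_pmDigits (a b : Int) :
    posicaoMenor a b =
      ((((pmDigits a b).1.zip (pmDigits a b).2.1).all fun p => decide (p.1 < p.2))
        && decide ((pmDigits a b).2.2.1 < (pmDigits a b).2.2.2)) := by
  rw [posicaoMenor, pmDigits]
  by_cases h : a < 10
  · simp only [if_pos h, if_neg (by omega : ¬ 10 ≤ a)]
    by_cases hlt : a < b <;> simp [hlt]
  · have h10 : 10 ≤ a := by omega
    simp only [if_neg h, if_pos h10, List.zip_cons_cons, List.all_cons]
    have ih := posicaoMenor_eq_pmDigits (PySem.Int.floordiv a 10) (PySem.Int.floordiv b 10)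
    simp only [PySem.Int.floordiv_eq_ediv_of_pos (by norm_num : (0:Int) < 10)] at ih
    by_cases hm : PySem.Int.mod a 10 < PySem.Int.mod b 10 <;>
      simp only [PySem.Int.mod_eq_emod_of_pos (by norm_num : (0:Int) < 10)] at hm
    · simp [hm, ih]
    · simp [hm]
termination_by a.toNat
decreasing_by
  simp only [PySem.Int.floordiv_eq_ediv_of_pos (by norm_num : (0:Int) < 10)]
  omega

-- ===== VERDICT (by name: the statement is the Claim_ definition above) =====
theorem posicaoMenor_spec : Claim_equal_posicaoMenor := by
  intro n1 n2 _
  unfold Spec_posicaoMenor posicaoMenor_alt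
  by_cases h : n1 < 10
  · rw [posicaoMenor]
    by_cases hlt : n1 < n2 <;> simp [h, hlt]
  · simp only [if_neg h]
    exact posicaoMenor_eq_pmDigits n1 n2
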